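-- pv_equiv track=rewrite | github.com/subodh30/code | 2497-maximum-star-sum-of-a-graph/2497-maximum-star-sum-of-a-graph.py | maxStarSum
-- ===== SOURCE A (Python) =====
-- from typing import List
--
-- def maxStarSum(vals: List[int], edges: List[List[int]], k: int) -> int:
--     d={}
--     for i in range(len(vals)):
--         d[i] = []
--     for e in edges:
--         d[e[0]].append(vals[e[1]])
--         d[e[1]].append(vals[e[0]])
--
--     maxSum = float("-inf")
--     for i in range(len(vals)):
--         v = d[i]
--         tsum = 0
--         sv = sorted(v, reverse=True)
--         mmax=0
--         for j in range(min(len(v), k)):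
--             tsum+=sv[j]
--             mmax=max(mmax, tsum)
--         mmax+=vals[i]
--         maxSum = max(maxSum, mmax)
--
--     return maxSum
-- ===== SOURCE B (Python) =====
-- from typing import List
--
-- def _push(t, x, cap):
--     # keep t a descending list of at most cap positive values
--     if x <= 0:
--         return t
--     j = 0
--     while j < len(t) and t[j] >= x:
--         j += 1
--     t = t[:j] + [x] + t[j:]
--     if len(t) > cap:
--         t.pop()
--     return t
--
-- def maxStarSum(vals: List[int], edges: List[List[int]], k: int) -> int:
--     cap = k if k > 0 else 0
--     top = {i: [] for i in range(len(vals))}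
--     for e in edges:
--         a, b = e[0], e[1]
--         top[a] = _push(top[a], vals[b], cap)
--         top[b] = _push(top[b], vals[a], cap)
--     best = None
--     for i in range(len(vals)):
--         s = vals[i] + sum(top[i])
--         if best is None or s > best:
--             best = s
--     return best
-- ===== Notes on version B (the rewrite author's own statement) =====
-- stated objective: alternative
-- what changed: Instead of collecting every neighbour value per node and then sorting each list and taking a prefix-max, B makes one pass over the edges maintaining, per node, a capped descending list of at most k positive neighbour values (insert in order, drop the smallest on overflow), then takes each node's value plus its list sum.
-- outside the precondition, e.g. on maxStarSum([], [], 1): A returns -inf, B returns None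
import Mathlib
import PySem

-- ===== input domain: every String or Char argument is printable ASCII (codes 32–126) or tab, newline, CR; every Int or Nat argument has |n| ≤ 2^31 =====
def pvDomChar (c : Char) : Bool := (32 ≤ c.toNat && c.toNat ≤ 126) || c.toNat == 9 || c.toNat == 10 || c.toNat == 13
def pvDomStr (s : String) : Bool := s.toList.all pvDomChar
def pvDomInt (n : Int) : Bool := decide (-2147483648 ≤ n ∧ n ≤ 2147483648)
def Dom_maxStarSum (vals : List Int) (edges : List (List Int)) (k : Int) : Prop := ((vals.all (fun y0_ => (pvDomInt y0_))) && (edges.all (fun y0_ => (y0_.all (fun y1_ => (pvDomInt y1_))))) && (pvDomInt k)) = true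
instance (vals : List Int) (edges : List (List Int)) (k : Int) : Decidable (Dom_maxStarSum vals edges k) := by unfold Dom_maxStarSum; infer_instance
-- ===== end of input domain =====

-- B replaces A's collect-all-neighbors-then-sort-then-prefix-max pass by a single pass over the
-- edges that maintains, per node, a descending list of at most k positive neighbour values
-- (objective: alternative — a different data structure, similar cost).

-- ===== PORT A =====
def maxStarSum (vals : List Int) (edges : List (List Int)) (k : Int) : Int :=
  let n := PySem.List.len vals
  let d0 : PySem.Dict Int (List Int) :=
    (PySem.List.pyRange 0 n).foldl (fun d i => d.insert i ([] : List Int)) PySem.Dict.empty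
  let d : PySem.Dict Int (List Int) :=
    edges.foldl (fun d e =>
      let d := d.modify (PySem.List.pyGetD e 0 0) []
        (fun v => v ++ [PySem.List.pyGetD vals (PySem.List.pyGetD e 1 0) 0])
      d.modify (PySem.List.pyGetD e 1 0) []
        (fun v => v ++ [PySem.List.pyGetD vals (PySem.List.pyGetD e 0 0) 0])) d0
  let maxSum : Option Int :=
    (PySem.List.pyRange 0 n).foldl (fun acc i =>
      let v := d.getD i []
      let sv := PySem.List.sorted v (fun x => x) true
      let r := (PySem.List.pyRange 0 (min (PySem.List.len v) k)).foldl
          (fun (s : Int × Int) j =>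
            (s.1 + PySem.List.pyGetD sv j 0, max s.2 (s.1 + PySem.List.pyGetD sv j 0)))
          ((0 : Int), (0 : Int))
      let mmax := r.2 + PySem.List.pyGetD vals i 0
      some (match acc with | none => mmax | some m => max m mmax)) none
  match maxSum with
  | some m => m
  | none => 0          -- unreachable under Pre_ (vals ≠ []); Python A returns float('-inf') here

-- ===== PORT B =====
-- insert x into the descending list t, after all elements ≥ x (B's scan `while t[j] >= x`)
def pvInsDesc (x : Int) : List Int → List Int
  | [] => [x]
  | y :: ys => if y < x then x :: y :: ys else y :: pvInsDesc x ys

-- B's _push: keep t a descending list of at most cap positive values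
def pvPush (cap : Int) (t : List Int) (x : Int) : List Int :=
  if x ≤ 0 then t
  else
    let t' := pvInsDesc x t
    if cap < PySem.List.len t' then t'.dropLast else t'

def maxStarSum_alt (vals : List Int) (edges : List (List Int)) (k : Int) : Int :=
  let cap : Int := if k > 0 then k else 0
  let top0 : PySem.Dict Int (List Int) :=
    (PySem.List.pyRange 0 (PySem.List.len vals)).foldl
      (fun d i => d.insert i ([] : List Int)) PySem.Dict.empty
  let top : PySem.Dict Int (List Int) :=
    edges.foldl (fun d e =>
      let a := PySem.List.pyGetD e 0 0
      let b := PySem.List.pyGetD e 1 0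
      let d := d.insert a (pvPush cap (d.getD a []) (PySem.List.pyGetD vals b 0))
      d.insert b (pvPush cap (d.getD b []) (PySem.List.pyGetD vals a 0))) top0
  let best : Option Int :=
    (PySem.List.pyRange 0 (PySem.List.len vals)).foldl (fun acc i =>
      let s := PySem.List.pyGetD vals i 0 + (top.getD i []).sum
      match acc with
      | none => some s
      | some b => if s > b then some s else some b) none
  match best with
  | some m => m
  | none => 0          -- unreachable under Pre_ (vals ≠ []); Python B's best is None only then

-- ===== PRECONDITION & SPEC =====
-- Pre_ excludes exactly the inputs where Python A raises: empty vals (A returns float('-inf'),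
-- not an int) and edges whose endpoints are missing/negative/out of range (IndexError/KeyError).
def Pre_maxStarSum (vals : List Int) (edges : List (List Int)) (k : Int) : Prop :=
  vals ≠ [] ∧ ∀ e ∈ edges, 2 ≤ e.length ∧
    0 ≤ e.getD 0 0 ∧ e.getD 0 0 < (vals.length : Int) ∧
    0 ≤ e.getD 1 0 ∧ e.getD 1 0 < (vals.length : Int)
instance (vals : List Int) (edges : List (List Int)) (k : Int) : Decidable (Pre_maxStarSum vals edges k) := by unfold Pre_maxStarSum; infer_instance

def pvWitness_maxStarSum : List Int × List (List Int) × Int := ([1, 2, -3], [[0, 1], [1, 2]], 2)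

def Spec_maxStarSum (vals : List Int) (edges : List (List Int)) (k : Int) (out : Int) : Prop := out = maxStarSum_alt vals edges k
instance (vals : List Int) (edges : List (List Int)) (k : Int) (out : Int) : Decidable (Spec_maxStarSum vals edges k out) := by unfold Spec_maxStarSum; infer_instance

-- ===== CLAIM (what is proved, stated in full; the proofs are below) =====
def Claim_equal_maxStarSum : Prop := ∀ (vals : List Int) (edges : List (List Int)) (k : Int), Dom_maxStarSum vals edges k → Pre_maxStarSum vals edges k → Spec_maxStarSum vals edges k (maxStarSum vals edges k)

-- ===== LEMMAS AND PROOFS =====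

-- the per-key streams of (node, neighbour value) contributions, in edge order
def pvPairs (vals : List Int) (edges : List (List Int)) : List (Int × Int) :=
  edges.flatMap (fun e =>
    [(PySem.List.pyGetD e 0 0, PySem.List.pyGetD vals (PySem.List.pyGetD e 1 0) 0),
     (PySem.List.pyGetD e 1 0, PySem.List.pyGetD vals (PySem.List.pyGetD e 0 0) 0)])

theorem pvA_fold_pairs (vals : List Int) (edges : List (List Int)) (d : PySem.Dict Int (List Int)) :
    edges.foldl (fun d e =>
      (d.modify (PySem.List.pyGetD e 0 0) []
        (fun v => v ++ [PySem.List.pyGetD vals (PySem.List.pyGetD e 1 0) 0])).modify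
        (PySem.List.pyGetD e 1 0) []
        (fun v => v ++ [PySem.List.pyGetD vals (PySem.List.pyGetD e 0 0) 0])) d
    = (pvPairs vals edges).foldl (fun d p => d.modify p.1 [] (fun v => v ++ [p.2])) d := by
  induction edges generalizing d with
  | nil => simp [pvPairs]
  | cons e es ih =>
    simp only [pvPairs, List.flatMap_cons, List.foldl_append, List.foldl_cons, List.foldl_nil] at ih ⊢
    exact ih _

theorem pvB_fold_pairs (vals : List Int) (edges : List (List Int)) (cap : Int) (d : PySem.Dict Int (List Int)) :
    edges.foldl (fun d e =>
      (d.insert (PySem.List.pyGetD e 0 0)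
        (pvPush cap (d.getD (PySem.List.pyGetD e 0 0) []) (PySem.List.pyGetD vals (PySem.List.pyGetD e 1 0) 0))).insert
        (PySem.List.pyGetD e 1 0)
        (pvPush cap ((d.insert (PySem.List.pyGetD e 0 0)
          (pvPush cap (d.getD (PySem.List.pyGetD e 0 0) []) (PySem.List.pyGetD vals (PySem.List.pyGetD e 1 0) 0))).getD
            (PySem.List.pyGetD e 1 0) []) (PySem.List.pyGetD vals (PySem.List.pyGetD e 0 0) 0))) d
    = (pvPairs vals edges).foldl (fun d p => d.insert p.1 (pvPush cap (d.getD p.1 []) p.2)) d := by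
  induction edges generalizing d with
  | nil => simp [pvPairs]
  | cons e es ih =>
    simp only [pvPairs, List.flatMap_cons, List.foldl_append, List.foldl_cons, List.foldl_nil] at ih ⊢
    exact ih _

theorem pvD0_getD (l : List Int) (c : Int) (d : PySem.Dict Int (List Int)) (h : d.getD c [] = []) :
    (l.foldl (fun d i => d.insert i ([] : List Int)) d).getD c [] = [] := by
  induction l generalizing d with
  | nil => exact h
  | cons i l ih =>
    simp only [List.foldl_cons]
    apply ih
    by_cases hc : c = i
    · subst hc; rw [PySem.Dict.getD_insert_self]
    · rw [PySem.Dict.getD_insert_of_ne _ _ _ hc, h]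

theorem pvB_entry (cap : Int) (ps : List (Int × Int)) (c : Int) :
    ∀ (d : PySem.Dict Int (List Int)),
    (ps.foldl (fun d p => d.insert p.1 (pvPush cap (d.getD p.1 []) p.2)) d).getD c []
    = ((ps.filter (fun p => p.1 == c)).map (fun p => p.2)).foldl (pvPush cap) (d.getD c []) := by
  induction ps with
  | nil => intro d; simp
  | cons p ps ih =>
    intro d
    simp only [List.foldl_cons]
    rw [ih]
    by_cases h : p.1 = c
    · rw [List.filter_cons_of_pos (by simp [h])]
      subst h
      rw [PySem.Dict.getD_insert_self]
      simp only [List.map_cons, List.foldl_cons]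
    · rw [List.filter_cons_of_neg (by simp [h])]
      rw [PySem.Dict.getD_insert_of_ne _ _ _ (fun hc => h hc.symm)]

-- ----- per-node lemmas -----

theorem pvLoop_nonpos (t : List Int) : ∀ (ts mm : Int), (∀ x ∈ t, x ≤ 0) → ts ≤ mm →
    (t.foldl (fun (s : Int × Int) x => (s.1 + x, max s.2 (s.1 + x))) (ts, mm)).2 = mm := by
  induction t with
  | nil => intro ts mm _ _; rfl
  | cons y ys ih =>
    intro ts mm hall hle
    have hy : y ≤ 0 := hall y (by simp)
    have h1 : max mm (ts + y) = mm := max_eq_left (by omega)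
    simp only [List.foldl_cons, h1]
    exact ih (ts + y) mm (fun x hx => hall x (by simp [hx])) (by omega)

theorem pvLoop_desc (t : List Int) : ∀ ts : Int, t.Pairwise (fun a b => b ≤ a) →
    (t.foldl (fun (s : Int × Int) x => (s.1 + x, max s.2 (s.1 + x))) (ts, ts)).2
    = ts + (t.filter (fun z => decide (0 < z))).sum := by
  induction t with
  | nil => intro ts _; simp
  | cons y ys ih =>
    intro ts hp
    rw [List.pairwise_cons] at hp
    by_cases hy : 0 < y
    · have h1 : max ts (ts + y) = ts + y := max_eq_right (by omega)
      simp only [List.foldl_cons, h1]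
      rw [ih (ts + y) hp.2]
      simp [hy]; ring
    · have hall : ∀ x ∈ y :: ys, x ≤ 0 := by
        intro x hx
        rcases List.mem_cons.1 hx with rfl | hx
        · omega
        · have := hp.1 x hx; omega
      have hfil : (y :: ys).filter (fun z => decide (0 < z)) = [] := by
        rw [List.filter_eq_nil_iff]
        intro a ha; have := hall a ha; simpa using (by omega : ¬ (0 < a))
      rw [hfil]
      have h1 : max ts (ts + y) = ts := max_eq_left (by omega)
      simp only [List.foldl_cons, h1]
      rw [pvLoop_nonpos ys (ts + y) ts (fun x hx => hall x (by simp [hx])) (by omega)]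
      simp

theorem pvFilter_pos_take (l : List Int) : ∀ c : Nat, l.Pairwise (fun a b => b ≤ a) →
    (l.take c).filter (fun z => decide (0 < z)) = (l.filter (fun z => decide (0 < z))).take c := by
  induction l with
  | nil => simp
  | cons y ys ih =>
    intro c hp
    rw [List.pairwise_cons] at hp
    cases c with
    | zero => simp
    | succ c' =>
      by_cases hy : 0 < y
      · simp [hy, ih c' hp.2]
      · have hfil : ∀ m : List Int, (∀ x ∈ m, x ≤ 0) → m.filter (fun z => decide (0 < z)) = [] := by
          intro m hm; rw [List.filter_eq_nil_iff]; intro a ha; have := hm a ha; simpa using (by omega : ¬ (0 < a))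
        rw [hfil ((y :: ys).take (c'+1)) ?_, hfil (y :: ys) ?_]
        · simp
        · intro x hx
          rcases List.mem_cons.1 hx with rfl | hx
          · omega
          · have := hp.1 x hx; omega
        · intro x hx
          have hx' := List.mem_of_mem_take hx
          rcases List.mem_cons.1 hx' with rfl | hx'
          · omega
          · have := hp.1 x hx'; omega

theorem pvInsDesc_eq_insertBy (x : Int) (l : List Int) :
    pvInsDesc x l = PySem.List.insertBy (fun a b => decide (b < a)) x l := by
  induction l with
  | nil => simp [pvInsDesc, PySem.List.insertBy]
  | cons y ys ih => simp [pvInsDesc, PySem.List.insertBy, ih]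

theorem pvSorted_rev_append (v : List Int) (x : Int) :
    PySem.List.sorted (v ++ [x]) (fun y => y) true
    = pvInsDesc x (PySem.List.sorted v (fun y => y) true) := by
  rw [PySem.List.sorted_rev_eq_foldl_insertBy, PySem.List.sorted_rev_eq_foldl_insertBy,
    List.foldl_append, pvInsDesc_eq_insertBy]
  rfl

theorem pvLength_insDesc (x : Int) (l : List Int) : (pvInsDesc x l).length = l.length + 1 := by
  induction l with
  | nil => simp [pvInsDesc]
  | cons y ys ih => by_cases h : y < x <;> simp [pvInsDesc, h, ih]

theorem pvFilter_insDesc_nonpos (x : Int) (hx : x ≤ 0) (l : List Int) :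
    (pvInsDesc x l).filter (fun z => decide (0 < z)) = l.filter (fun z => decide (0 < z)) := by
  induction l with
  | nil => simp [pvInsDesc]; omega
  | cons y ys ih =>
    by_cases h : y < x
    · simp [pvInsDesc, h, List.filter_cons]
      simp [hx]
    · simp [pvInsDesc, h, List.filter_cons, ih]

theorem pvInsDesc_of_forall_lt (x : Int) : ∀ (m : List Int), (∀ z ∈ m, z < x) →
    pvInsDesc x m = x :: m := by
  intro m hm
  cases m with
  | nil => rfl
  | cons z rest => simp [pvInsDesc, hm z (by simp)]

theorem pvFilter_insDesc_pos (x : Int) (hx : 0 < x) : ∀ (l : List Int),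
    l.Pairwise (fun a b => b ≤ a) →
    (pvInsDesc x l).filter (fun z => decide (0 < z))
    = pvInsDesc x (l.filter (fun z => decide (0 < z))) := by
  intro l
  induction l with
  | nil => simp [pvInsDesc, hx]
  | cons y ys ih =>
    intro hp
    rw [List.pairwise_cons] at hp
    by_cases h : y < x
    · simp only [pvInsDesc, if_pos h]
      rw [pvInsDesc_of_forall_lt x ((y :: ys).filter (fun z => decide (0 < z))) ?_]
      · simp [List.filter_cons, hx]
      · intro z hz
        have hz' := List.mem_of_mem_filter hz
        rcases List.mem_cons.1 hz' with rfl | hz'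
        · exact h
        · have := hp.1 z hz'; omega
    · have hy : 0 < y := by omega
      simp only [pvInsDesc, if_neg h, List.filter_cons, decide_eq_true_eq, hy]
      rw [ih hp.2]
      simp [pvInsDesc, h]

theorem pvPush_take (x : Int) (hx : 0 < x) : ∀ (l : List Int) (c : Nat),
    pvPush (c : Int) (l.take c) x = (pvInsDesc x l).take c := by
  intro l
  induction l with
  | nil =>
    intro c
    simp only [List.take_nil, pvPush, if_neg (by omega : ¬ x ≤ 0), pvInsDesc]
    cases c with
    | zero => simp [PySem.List.len]
    | succ c' => simp [PySem.List.len]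
  | cons y ys ih =>
    intro c
    cases c with
    | zero =>
      simp only [List.take_zero, pvPush, if_neg (by omega : ¬ x ≤ 0), pvInsDesc]
      simp [PySem.List.len]
    | succ c' =>
      simp only [List.take_succ_cons]
      by_cases h : y < x
      · simp only [pvPush, if_neg (by omega : ¬ x ≤ 0), pvInsDesc, if_pos h,
          PySem.List.len_eq]
        by_cases hc : c' ≤ ys.length
        · rw [if_pos (by simp [List.length_take]; omega)]
          have hlen : (x :: y :: ys.take c').length = c' + 2 := by simp [List.length_take]; omega
          rw [List.dropLast_eq_take, hlen]
          simp only [show c' + 2 - 1 = c' + 1 by omega]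
          simp only [List.take_succ_cons, List.cons.injEq, true_and]
          cases c' with
          | zero => simp
          | succ c'' =>
            simp only [List.take_succ_cons, List.take_take, List.cons.injEq, true_and]
            rw [show min c'' (c'' + 1) = c'' by omega]
        · rw [if_neg (by simp [List.length_take]; omega)]
          rw [List.take_of_length_le (by omega), List.take_of_length_le (by simp; omega)]
      · simp only [pvPush, if_neg (by omega : ¬ x ≤ 0), pvInsDesc, if_neg h,
          PySem.List.len_eq] at ih ⊢
        have hne : pvInsDesc x (ys.take c') ≠ [] := by
          intro hcon
          have := pvLength_insDesc x (ys.take c')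
          rw [hcon] at this; simp at this
        have hlen2 : (pvInsDesc x (ys.take c')).length = min c' ys.length + 1 := by
          rw [pvLength_insDesc]; simp [List.length_take]
        by_cases hc : c' ≤ ys.length
        · have hcond : ((c' : Int) + 1) < (y :: pvInsDesc x (ys.take c')).length := by
            simp [hlen2]; omega
          rw [if_pos (by exact_mod_cast hcond)]
          have ihc := ih c'
          rw [if_pos (by simp [hlen2]; omega)] at ihc
          rw [List.dropLast_cons_of_ne_nil hne, List.take_succ_cons, ihc]
        · have hcond : ¬ (((c' : Int) + 1) < (y :: pvInsDesc x (ys.take c')).length) := by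
            simp [hlen2]; omega
          rw [if_neg (by exact_mod_cast hcond)]
          have ihc := ih c'
          rw [if_neg (by simp [hlen2]; omega)] at ihc
          rw [List.take_succ_cons, ihc]

theorem pvFoldPush_eq (c : Nat) (w : List Int) :
    w.foldl (pvPush (c : Int)) []
    = ((PySem.List.sorted w (fun y => y) true).filter (fun z => decide (0 < z))).take c := by
  induction w using List.reverseRecOn with
  | nil =>
    rw [show PySem.List.sorted ([] : List Int) (fun y => y) true = [] from
      (PySem.List.sorted_eq_nil_iff _ _ _).mpr rfl]
    simp
  | append_singleton w x ih =>
    rw [List.foldl_append, List.foldl_cons, List.foldl_nil, ih, pvSorted_rev_append]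
    by_cases hx : x ≤ 0
    · rw [pvFilter_insDesc_nonpos x hx]
      simp [pvPush, hx]
    · have hx' : 0 < x := by omega
      rw [pvFilter_insDesc_pos x hx' _ (PySem.List.sorted_pairwise_rev w (fun y => y))]
      exact pvPush_take x hx' _ c

theorem pvCap_eq (k : Int) : (if k > 0 then k else 0) = (k.toNat : Int) := by
  split_ifs with h <;> omega

theorem pvRange_foldl_take (sv : List Int) (mN : Nat) (h : mN ≤ sv.length)
    (g : (Int × Int) → Int → (Int × Int)) (init : Int × Int) :
    (PySem.List.pyRange 0 (mN : Int)).foldl (fun s j => g s (PySem.List.pyGetD sv j 0)) init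
    = (sv.take mN).foldl g init := by
  have hlen : PySem.List.len (sv.take mN) = (mN : Int) := by
    simp [PySem.List.len_eq]; omega
  have hbase := PySem.List.foldl_pyRange_pyGetD (sv.take mN) 0 g init (a := 0) le_rfl
  rw [hlen] at hbase
  simp only [Int.toNat_zero, List.drop_zero] at hbase
  rw [← hbase]
  apply PySem.List.foldl_congr_mem
  intro acc j hj
  rw [PySem.List.pyRange_zero_natCast] at hj
  simp only [List.mem_map, List.mem_range] at hj
  obtain ⟨a, ha, rfl⟩ := hj
  congr 1
  rw [PySem.List.pyGetD_natCast, PySem.List.pyGetD_natCast]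
  rw [List.getD_eq_getElem?_getD, List.getD_eq_getElem?_getD, List.getElem?_take]
  simp [ha]

theorem pvRange_min (w : List Int) (k : Int) :
    PySem.List.pyRange 0 (min (PySem.List.len w) k)
    = PySem.List.pyRange 0 ((min w.length k.toNat : Nat) : Int) := by
  by_cases hk : 0 ≤ k
  · congr 1
    simp [PySem.List.len_eq]
    omega
  · have h1 : min (PySem.List.len w) k = k := by
      simp [PySem.List.len_eq]
      omega
    have h2 : ((min w.length k.toNat : Nat) : Int) = 0 := by omega
    rw [h1, h2]
    simp [PySem.List.pyRange]
    omega

theorem pvNodeA_eq (w : List Int) (k : Int) :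
    ((PySem.List.pyRange 0 (min (PySem.List.len w) k)).foldl
      (fun (s : Int × Int) j =>
        (s.1 + PySem.List.pyGetD (PySem.List.sorted w (fun x => x) true) j 0,
         max s.2 (s.1 + PySem.List.pyGetD (PySem.List.sorted w (fun x => x) true) j 0)))
      ((0 : Int), (0 : Int))).2
    = (((PySem.List.sorted w (fun y => y) true).filter (fun z => decide (0 < z))).take k.toNat).sum := by
  have hlensorted : (PySem.List.sorted w (fun y => y) true).length = w.length :=
    PySem.List.length_sorted w _ _
  have hdesc : (PySem.List.sorted w (fun y => y) true).Pairwise (fun a b => b ≤ a) :=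
    PySem.List.sorted_pairwise_rev w (fun y => y)
  rw [pvRange_min]
  rw [pvRange_foldl_take (PySem.List.sorted w (fun x => x) true) (min w.length k.toNat)
    (by omega) (fun s x => (s.1 + x, max s.2 (s.1 + x))) ((0 : Int), (0 : Int))]
  rw [pvLoop_desc _ 0 (hdesc.sublist (List.take_sublist _ _))]
  rw [pvFilter_pos_take _ _ hdesc]
  have hfl : ((PySem.List.sorted w (fun y => y) true).filter (fun z => decide (0 < z))).length
      ≤ w.length := by
    calc _ ≤ (PySem.List.sorted w (fun y => y) true).length := List.length_filter_le _ _
    _ = w.length := hlensorted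
  by_cases hk : k.toNat ≤ w.length
  · rw [show min w.length k.toNat = k.toNat by omega]
    omega
  · rw [List.take_of_length_le (by omega), List.take_of_length_le (by omega)]
    omega

theorem pvStep_eq (acc : Option Int) (a b : Int) (h : a = b) :
    (some (match acc with | none => a | some m => max m a) : Option Int)
    = (match acc with | none => some b | some m => if b > m then some b else some m) := by
  subst h
  cases acc with
  | none => rfl
  | some m =>
    show some (max m a) = if a > m then some a else some m
    split_ifs with h2 <;> (congr 1; omega)

-- ===== VERDICT (by name: the statement is the Claim_ definition above) =====
theorem maxStarSum_spec : Claim_equal_maxStarSum := by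
  intro vals edges k _ _
  unfold Spec_maxStarSum
  simp only [maxStarSum, maxStarSum_alt]
  rw [pvA_fold_pairs, pvCap_eq, pvB_fold_pairs]
  congr 1
  apply PySem.List.foldl_congr_mem
  intro acc i _
  have hA : (((pvPairs vals edges).foldl (fun d p => d.modify p.1 [] (fun v => v ++ [p.2]))
        ((PySem.List.pyRange 0 (PySem.List.len vals)).foldl
          (fun d i => d.insert i ([] : List Int)) PySem.Dict.empty)).getD i [])
      = ((pvPairs vals edges).filter (fun p => p.1 == i)).map (fun p => p.2) := by
    rw [PySem.Dict.getD_foldl_modify_append, pvD0_getD _ _ _ (PySem.Dict.getD_empty i []),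
      List.nil_append]
  have hB : (((pvPairs vals edges).foldl
        (fun d p => d.insert p.1 (pvPush ((k.toNat : Nat) : Int) (d.getD p.1 []) p.2))
        ((PySem.List.pyRange 0 (PySem.List.len vals)).foldl
          (fun d i => d.insert i ([] : List Int)) PySem.Dict.empty)).getD i [])
      = (((pvPairs vals edges).filter (fun p => p.1 == i)).map (fun p => p.2)).foldl
          (pvPush ((k.toNat : Nat) : Int)) [] := by
    rw [pvB_entry, pvD0_getD _ _ _ (PySem.Dict.getD_empty i [])]
  apply pvStep_eq
  rw [hA, hB, pvNodeA_eq, pvFoldPush_eq]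
  omega
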